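-- pv_equiv track=rewrite | github.com/talveRinat/EternalContest | task7.py | full_answer
-- ===== SOURCE A (Python) =====
-- def full_answer(count_of_members, members):
--     counts = {num: 0 for num in range(1, count_of_members + 1)}
--     for member in members:
--         counts[member] += 1
--
--     def is_sequence(sequence, sequence_len):
--         unique_numbers = set()
--         current_position = 1
--         for _ in range(sequence_len):
--             current_position = sequence[current_position - 1]
--             if current_position in unique_numbers:
--                 return False
--             unique_numbers.add(current_position)
--             if current_position == 1:
--                 return len(unique_numbers) == sequence_len
--         return False
--
--     def answer():
--         count_of_problems = 0
--         place, number = None, None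
--         for key, value in counts.items():
--             if count_of_problems > 2:
--                 return '-1 -1'
--             if value == 0:
--                 number = key
--                 count_of_problems += 1
--             elif value == 2:
--                 place = key
--                 count_of_problems += 1
--             elif value > 2:
--                 count_of_problems += value
--         if count_of_problems == 0:
--             return '-1 -1'
--         if count_of_problems == 2:
--             for idx, current in enumerate(members):
--                 if current == place and idx + 1 != number:
--                     changed_sequence = members[:]
--                     changed_sequence[idx] = number
--                     if is_sequence(changed_sequence, len(changed_sequence)):
--                         return f'{idx+1} {number}'
--         return '-1 -1'
--
--     return answer()
-- ===== SOURCE B (Python) =====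
-- def full_answer(count_of_members, members):
--     n = count_of_members
--     cnt = {num: 0 for num in range(1, n + 1)}
--     for m in members:
--         cnt[m] += 1
--     missing = [v for v in range(1, n + 1) if cnt[v] == 0]
--     doubled = [v for v in range(1, n + 1) if cnt[v] == 2]
--     if len(missing) != 1 or len(doubled) != 1 \
--             or any(cnt[v] > 2 for v in range(1, n + 1)):
--         return '-1 -1'
--     number, place = missing[0], doubled[0]
--     # Single walk in the ORIGINAL graph: the edited graph is one n-cycle iff the
--     # original edges form a Hamiltonian path starting at `number`; the node to
--     # re-point is exactly the endpoint of that walk, so no edit needs simulating.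
--     pos = number
--     seen = {number}
--     for _ in range(n - 1):
--         pos = members[pos - 1]
--         seen.add(pos)
--     if len(seen) == n and members[pos - 1] == place:
--         return f'{pos} {number}'
--     return '-1 -1'
-- ===== Notes on version B (the rewrite author's own statement) =====
-- stated objective: alternative
-- what changed: Instead of A's try-each-candidate scheme (copy the list at every position holding the doubled value, re-point it, and simulate the edited graph from node 1 with a visited set), B performs a single walk in the ORIGINAL graph starting at the missing value: the edit yields one full n-cycle exactly when the original edges form a Hamiltonian path from the missing value, whose endpoint is the unique node to re-point, so no edited copies are built or simulated.
-- outside the precondition, e.g. on full_answer(2, [1, 1, 2, 2]): A returns '-1 -1', B returns '-1 -1'; on full_answer(2, [2, 2, 1, 1]): A raises TypeError, B returns '-1 -1'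
import Mathlib
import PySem

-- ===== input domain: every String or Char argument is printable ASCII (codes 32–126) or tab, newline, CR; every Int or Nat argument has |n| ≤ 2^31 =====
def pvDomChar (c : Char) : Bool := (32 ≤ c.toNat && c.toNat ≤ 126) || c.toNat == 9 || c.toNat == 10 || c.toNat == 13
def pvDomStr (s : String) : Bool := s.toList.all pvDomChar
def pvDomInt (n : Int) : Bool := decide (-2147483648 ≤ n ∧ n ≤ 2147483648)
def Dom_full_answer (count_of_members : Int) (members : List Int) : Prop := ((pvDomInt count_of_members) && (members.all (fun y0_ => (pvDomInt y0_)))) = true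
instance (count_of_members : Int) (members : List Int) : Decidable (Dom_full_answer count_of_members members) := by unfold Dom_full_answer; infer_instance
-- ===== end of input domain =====

-- B replaces A's try-each-candidate search (copy the list at each position holding the doubled
-- value and simulate the edited graph from node 1) by a single walk in the ORIGINAL graph from
-- the missing value, whose endpoint is the unique node to re-point; objective: alternative.

-- ===== PORT A =====
-- the 'for key, value in counts.items()' loop of answer(): returns none on the early 'return' (count_of_problems > 2),
-- otherwise the final (count_of_problems, place, number)
def pvAClassify : List (Int × Int) → Int → Option Int → Option Int → Option (Int × Option Int × Option Int)
  | [], cp, pl, nm => some (cp, pl, nm)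
  | (k, v) :: rest, cp, pl, nm =>
    if cp > 2 then none
    else if v == 0 then pvAClassify rest (cp + 1) pl (some k)
    else if v == 2 then pvAClassify rest (cp + 1) (some k) nm
    else if v > 2 then pvAClassify rest (cp + v) pl nm
    else pvAClassify rest cp pl nm

-- is_sequence: fuel = the 'for _ in range(sequence_len)' counter; pyGet? none = IndexError (unreachable under Pre_)
def pvAIsSeq (seq : List Int) : Nat → PySem.Set Int → Int → Bool
  | 0, _, _ => false
  | fuel + 1, uniq, pos =>
    match PySem.List.pyGet? seq (pos - 1) with
    | none => false
    | some p =>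
      if PySem.Set.contains uniq p then false
      else
        let u := PySem.Set.add uniq p
        if p == 1 then PySem.Set.len u == PySem.List.len seq
        else pvAIsSeq seq fuel u p

-- the 'for idx, current in enumerate(members)' search; place/number are Options (None in Python).
-- When number is None and the condition fires, Python stores None and is_sequence later raises TypeError;
-- that is unreachable under Pre_, so the port skips (recurses).
def pvASearch (pl nm : Option Int) (members : List Int) : List (Int × Int) → String
  | [] => "-1 -1"
  | (idx, cur) :: rest =>
    if pl == some cur && !(nm == some (idx + 1)) then
      match nm with
      | some num =>
        let changed := members.set idx.toNat num
        if pvAIsSeq changed changed.length PySem.Set.empty 1 then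
          PySem.Int.toStr (idx + 1) ++ " " ++ PySem.Int.toStr num
        else pvASearch pl nm members rest
      | none => pvASearch pl nm members rest
    else pvASearch pl nm members rest

def full_answer (count_of_members : Int) (members : List Int) : String :=
  let init := (PySem.List.pyRange 1 (count_of_members + 1) 1).foldl
      (fun d v => d.insert v (0 : Int)) PySem.Dict.empty
  -- counts[member] += 1 ; a missing key is a KeyError in Python (excluded by Pre_)
  let counts := members.foldl (fun d m => d.modify m 0 (· + 1)) init
  match pvAClassify counts.items 0 none none with
  | none => "-1 -1"
  | some (cp, pl, nm) =>
    if cp == 0 then "-1 -1"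
    else if cp == 2 then pvASearch pl nm members (PySem.List.enumerate members 0)
    else "-1 -1"

-- ===== PORT B =====
-- the 'for _ in range(n - 1)' walk: pos = members[pos - 1]; seen.add(pos).
-- pyGet? none = IndexError in Python (unreachable under Pre_ in the branch that walks)
def pvBWalk (members : List Int) : Nat → Int → PySem.Set Int → Int × PySem.Set Int
  | 0, pos, seen => (pos, seen)
  | k + 1, pos, seen =>
    match PySem.List.pyGet? members (pos - 1) with
    | none => (pos, seen)
    | some p => pvBWalk members k p (PySem.Set.add seen p)

def full_answer_alt (count_of_members : Int) (members : List Int) : String :=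
  -- cnt = {num: 0 for num in range(1, n+1)}; cnt[m] += 1 (KeyError outside 1..n, excluded by Pre_)
  let init := (PySem.List.pyRange 1 (count_of_members + 1) 1).foldl
      (fun d v => d.insert v (0 : Int)) PySem.Dict.empty
  let cnt := members.foldl (fun d m => d.modify m 0 (· + 1)) init
  let rng := PySem.List.pyRange 1 (count_of_members + 1) 1
  let missing := rng.filter (fun v => cnt.getD v 0 == 0)
  let doubled := rng.filter (fun v => cnt.getD v 0 == 2)
  if !(missing.length == 1) || !(doubled.length == 1) ||
      rng.any (fun v => decide (2 < cnt.getD v 0)) then "-1 -1"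
  else
    -- missing[0] / doubled[0]: headI is exact under the length == 1 guard
    let number := missing.headI
    let place := doubled.headI
    let r := pvBWalk members (count_of_members - 1).toNat number (PySem.Set.add PySem.Set.empty number)
    -- members[pos - 1] == place: pyGet? none (IndexError) unreachable under Pre_ here
    if PySem.Set.len r.2 == count_of_members &&
        (PySem.List.pyGet? members (r.1 - 1) == some place) then
      PySem.Int.toStr r.1 ++ " " ++ PySem.Int.toStr number
    else "-1 -1"

-- ===== PRECONDITION & SPEC =====
-- Pre_ excludes (a) members outside 1..count_of_members, where A raises KeyError, and (b) the corner with no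
-- missing value, exactly two doubled values and no value thrice, where A may write None into the candidate
-- list and raise TypeError (B returns '-1 -1' on all of that corner).
def Pre_full_answer (count_of_members : Int) (members : List Int) : Prop :=
  (∀ m ∈ members, 1 ≤ m ∧ m ≤ count_of_members) ∧
  ¬ (((PySem.List.pyRange 1 (count_of_members + 1) 1).filter (fun v => members.count v == 0)).length = 0 ∧
     ((PySem.List.pyRange 1 (count_of_members + 1) 1).filter (fun v => members.count v == 2)).length = 2 ∧
     ∀ v ∈ PySem.List.pyRange 1 (count_of_members + 1) 1, members.count v ≤ 2)
instance (count_of_members : Int) (members : List Int) : Decidable (Pre_full_answer count_of_members members) := by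
  unfold Pre_full_answer; infer_instance

def pvWitness_full_answer : Int × List Int := (3, [2, 3, 3])

def Spec_full_answer (count_of_members : Int) (members : List Int) (out : String) : Prop := out = full_answer_alt count_of_members members
instance (count_of_members : Int) (members : List Int) (out : String) : Decidable (Spec_full_answer count_of_members members out) := by unfold Spec_full_answer; infer_instance

-- ===== CLAIM (what is proved, stated in full; the proofs are below) =====
def Claim_equal_full_answer : Prop := ∀ (count_of_members : Int) (members : List Int), Dom_full_answer count_of_members members → Pre_full_answer count_of_members members → Spec_full_answer count_of_members members (full_answer count_of_members members)

-- ===== LEMMAS AND PROOFS =====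

-- ---------- classification side (identical on both programs) ----------

-- weight that A's counter adds for one dict value
def pvW (v : Int) : Int := if v == 0 then 1 else if v == 2 then 1 else if v > 2 then v else 0

def pvS (L : List (Int × Int)) : Int := (L.map (fun p => pvW p.2)).sum

-- last key whose value satisfies p (what A's loop leaves in place/number)
def pvLastP (p : Int → Bool) : List (Int × Int) → Option Int → Option Int
  | [], acc => acc
  | (k, v) :: rest, acc => pvLastP p rest (if p v then some k else acc)

theorem pvW_nonneg (v : Int) : 0 ≤ pvW v := by
  unfold pvW; split_ifs <;> omega

theorem pvS_nonneg (L : List (Int × Int)) : 0 ≤ pvS L := by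
  induction L with
  | nil => simp [pvS]
  | cons h t ih => simp only [pvS, List.map_cons, List.sum_cons] at *
                   have := pvW_nonneg h.2; omega

theorem pvS_cons (k v : Int) (L : List (Int × Int)) : pvS ((k, v) :: L) = pvW v + pvS L := by
  simp [pvS]

theorem pvAClassify_some {L : List (Int × Int)} {cp c : Int} {pl nm p m : Option Int}
    (h : pvAClassify L cp pl nm = some (c, p, m)) :
    c = cp + pvS L ∧ p = pvLastP (fun v => v == 2) L pl ∧ m = pvLastP (fun v => v == 0) L nm := by
  induction L generalizing cp pl nm with
  | nil =>
    simp only [pvAClassify, Option.some.injEq, Prod.mk.injEq] at h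
    obtain ⟨h1, h2, h3⟩ := h
    refine ⟨?_, ?_, ?_⟩
    · rw [← h1]; simp [pvS]
    · rw [← h2]; simp [pvLastP]
    · rw [← h3]; simp [pvLastP]
  | cons kv rest ih =>
    obtain ⟨k, v⟩ := kv
    rw [pvAClassify] at h
    rw [pvS_cons]
    by_cases hcp : cp > 2
    · rw [if_pos hcp] at h; exact absurd h (by simp)
    rw [if_neg hcp] at h
    by_cases hv0 : v = 0
    · subst hv0
      rw [if_pos (by simp)] at h
      obtain ⟨e1, e2, e3⟩ := ih h
      refine ⟨?_, ?_, ?_⟩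
      · rw [e1]; norm_num [pvW]; ring
      · rw [e2]; simp [pvLastP]
      · rw [e3]; simp [pvLastP]
    rw [if_neg (by simpa using hv0)] at h
    by_cases hv2 : v = 2
    · subst hv2
      rw [if_pos (by simp)] at h
      obtain ⟨e1, e2, e3⟩ := ih h
      refine ⟨?_, ?_, ?_⟩
      · rw [e1]; norm_num [pvW]; ring
      · rw [e2]; simp [pvLastP]
      · rw [e3]; simp [pvLastP]
    rw [if_neg (by simpa using hv2)] at h
    by_cases hvg : v > 2
    · rw [if_pos hvg] at h
      obtain ⟨e1, e2, e3⟩ := ih h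
      have hW : pvW v = v := by simp [pvW, hv0, hv2, hvg]
      refine ⟨?_, ?_, ?_⟩
      · rw [e1, hW]; ring
      · rw [e2]; simp [pvLastP, hv2]
      · rw [e3]; simp [pvLastP, hv0]
    · rw [if_neg hvg] at h
      obtain ⟨e1, e2, e3⟩ := ih h
      have hW : pvW v = 0 := by simp [pvW, hv0, hv2, hvg]
      refine ⟨?_, ?_, ?_⟩
      · rw [e1, hW]; ring
      · rw [e2]; simp [pvLastP, hv2]
      · rw [e3]; simp [pvLastP, hv0]

theorem pvAClassify_isSome (L : List (Int × Int)) (cp : Int) (pl nm : Option Int)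
    (h0 : 0 ≤ cp) (h2 : cp + pvS L ≤ 2) :
    ∃ r, pvAClassify L cp pl nm = some r := by
  induction L generalizing cp pl nm with
  | nil => exact ⟨_, rfl⟩
  | cons kv rest ih =>
    obtain ⟨k, v⟩ := kv
    have hS : 0 ≤ pvS rest := pvS_nonneg rest
    have hWv : 0 ≤ pvW v := pvW_nonneg v
    rw [pvS_cons] at h2
    rw [pvAClassify, if_neg (by omega : ¬ cp > 2)]
    by_cases hv0 : v = 0
    · subst hv0
      have hW : pvW (0 : Int) = 1 := by norm_num [pvW]
      rw [if_pos (by simp)]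
      exact ih (cp + 1) pl (some k) (by omega) (by rw [hW] at h2; omega)
    rw [if_neg (by simpa using hv0)]
    by_cases hv2 : v = 2
    · subst hv2
      have hW : pvW (2 : Int) = 1 := by norm_num [pvW]
      rw [if_pos (by simp)]
      exact ih (cp + 1) (some k) nm (by omega) (by rw [hW] at h2; omega)
    rw [if_neg (by simpa using hv2)]
    by_cases hvg : v > 2
    · have hW : pvW v = v := by simp [pvW, hv0, hv2, hvg]
      rw [if_pos hvg]
      exact ih (cp + v) pl nm (by omega) (by rw [hW] at h2; omega)
    · have hW : pvW v = 0 := by simp [pvW, hv0, hv2, hvg]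
      rw [if_neg hvg]
      exact ih cp pl nm h0 (by rw [hW] at h2; omega)

theorem pvLastP_filter_nil (p : Int → Bool) (g : Int → Int) : ∀ (xs : List Int) (acc : Option Int),
    xs.filter (fun v => p (g v)) = [] →
    pvLastP p (xs.map (fun v => (v, g v))) acc = acc
  | [], _, _ => rfl
  | x :: t, acc, h => by
    rw [List.filter_cons] at h
    by_cases hx : p (g x) = true
    · simp [hx] at h
    · have hxf : p (g x) = false := Bool.eq_false_iff.mpr hx
      rw [hxf, if_neg (by simp)] at h
      simp only [List.map_cons, pvLastP, hxf, Bool.false_eq_true, if_false]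
      exact pvLastP_filter_nil p g t acc h

theorem pvLastP_filter_singleton (p : Int → Bool) (g : Int → Int) : ∀ (xs : List Int) (acc : Option Int) (x : Int),
    xs.filter (fun v => p (g v)) = [x] →
    pvLastP p (xs.map (fun v => (v, g v))) acc = some x
  | [], _, _, h => by simp at h
  | y :: t, acc, x, h => by
    rw [List.filter_cons] at h
    by_cases hy : p (g y) = true
    · rw [hy, if_pos rfl] at h
      obtain ⟨h1, h2⟩ := List.cons_eq_cons.mp h
      subst h1
      simp only [List.map_cons, pvLastP, hy, if_pos]
      exact pvLastP_filter_nil p g t (some y) h2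
    · have hyf : p (g y) = false := Bool.eq_false_iff.mpr hy
      rw [hyf, if_neg (by simp)] at h
      simp only [List.map_cons, pvLastP, hyf, Bool.false_eq_true, if_false]
      exact pvLastP_filter_singleton p g t acc x h

theorem pvS_map_eq (g : Int → Int) (xs : List Int) (hg : ∀ v, 0 ≤ g v)
    (h : ∀ v ∈ xs, g v ≤ 2) :
    pvS (xs.map (fun v => (v, g v))) =
      ((xs.filter (fun v => g v == 0)).length : Int) + ((xs.filter (fun v => g v == 2)).length : Int) := by
  induction xs with
  | nil => simp [pvS]
  | cons x t ih =>
    have hx := h x (by simp)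
    have ht : ∀ v ∈ t, g v ≤ 2 := fun v hv => h v (by simp [hv])
    have hgx := hg x
    have hrec := ih ht
    rw [List.map_cons, pvS_cons, hrec, List.filter_cons, List.filter_cons]
    have : g x = 0 ∨ g x = 1 ∨ g x = 2 := by omega
    rcases this with h0 | h1 | h2
    · simp [h0, pvW] <;> omega
    · simp [h1, pvW] <;> omega
    · simp [h2, pvW] <;> omega

theorem pvS_map_ge_three (g : Int → Int) (xs : List Int) (hg : ∀ v, 0 ≤ g v)
    (h : ∃ v ∈ xs, 2 < g v) :
    3 ≤ pvS (xs.map (fun v => (v, g v))) := by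
  induction xs with
  | nil => simp at h
  | cons x t ih =>
    rw [List.map_cons, pvS_cons]
    have hS : 0 ≤ pvS (t.map (fun v => (v, g v))) := pvS_nonneg _
    rcases h with ⟨v, hv, hgv⟩
    rcases List.mem_cons.mp hv with rfl | hvt
    · have : pvW (g v) = g v := by
        simp [pvW]
        omega
      have := pvW_nonneg (g v)
      omega
    · have := ih ⟨v, hvt, hgv⟩
      have := pvW_nonneg (g x)
      omega

theorem pvASearch_none (nm : Option Int) (members : List Int) (l : List (Int × Int)) :
    pvASearch none nm members l = "-1 -1" := by
  induction l with
  | nil => rfl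
  | cons ic rest ih =>
    obtain ⟨idx, cur⟩ := ic
    -- the guard 'none == some cur && …' is definitionally false
    exact ih

theorem pvCast_beq (c m : Nat) : (((c : Int)) == ((m : Int))) = (c == m) := by
  by_cases h : c = m
  · subst h; simp
  · have h1 : ¬ (c : Int) = (m : Int) := by exact_mod_cast h
    rw [beq_eq_false_iff_ne.mpr h1, beq_eq_false_iff_ne.mpr h]

theorem pvCast_beq0 (c : Nat) : (((c : Int)) == 0) = (c == 0) := by
  simpa using pvCast_beq c 0

theorem pvCast_beq2 (c : Nat) : (((c : Int)) == 2) = (c == 2) := by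
  simpa using pvCast_beq c 2

theorem pvCounts_items (n : Int) (ms : List Int) (h : ∀ m ∈ ms, m ∈ PySem.List.pyRange 1 (n + 1) 1) :
    (ms.foldl (fun d m => d.modify m 0 (· + 1))
      ((PySem.List.pyRange 1 (n + 1) 1).foldl (fun d v => d.insert v (0 : Int)) PySem.Dict.empty)).items
    = (PySem.List.pyRange 1 (n + 1) 1).map (fun v => (v, (ms.count v : Int))) := by
  have hRnd : (PySem.List.pyRange 1 (n + 1) 1).Nodup := PySem.List.nodup_pyRange_one 1 (n + 1)
  have hinit_items : ((PySem.List.pyRange 1 (n + 1) 1).foldl (fun d v => d.insert v (0 : Int)) PySem.Dict.empty).items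
      = (PySem.List.pyRange 1 (n + 1) 1).map (fun v => (v, (0 : Int))) := by
    have := PySem.Dict.items_foldl_insert_fresh (l := PySem.List.pyRange 1 (n + 1) 1)
      (k := fun a => a) (v := fun _ => (0 : Int)) (d := PySem.Dict.empty)
      (by intro a _; exact PySem.Dict.contains_empty a) (by simpa using hRnd)
    simpa using this
  have hinit_keys : ((PySem.List.pyRange 1 (n + 1) 1).foldl (fun d v => d.insert v (0 : Int)) PySem.Dict.empty).keys
      = PySem.List.pyRange 1 (n + 1) 1 := by
    simp only [PySem.Dict.keys, hinit_items, List.map_map]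
    rw [show ((fun x : Int × Int => x.1) ∘ fun v : Int => (v, (0 : Int))) = id from rfl, List.map_id]
  have hckeys : (ms.foldl (fun d m => d.modify m 0 (· + 1))
      ((PySem.List.pyRange 1 (n + 1) 1).foldl (fun d v => d.insert v (0 : Int)) PySem.Dict.empty)).keys
      = PySem.List.pyRange 1 (n + 1) 1 := by
    rw [PySem.Dict.keys_foldl_modify, hinit_keys]
    rw [PySem.Set.update_eq_append_filter]
    have hnil : (PySem.Set.ofList ms).filter (fun y => !(PySem.Set.contains (PySem.List.pyRange 1 (n + 1) 1) y)) = [] := by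
      apply List.filter_eq_nil_iff.mpr
      intro y hy
      have hyR : y ∈ PySem.List.pyRange 1 (n + 1) 1 := h y (by simpa [PySem.Set.mem_ofList] using hy)
      rw [PySem.List.mem_pyRange_one] at hyR
      simp [PySem.Set.contains_iff, PySem.List.mem_pyRange_one] <;> omega
    rw [hnil, List.append_nil]
  have hcnodup : (ms.foldl (fun d m => d.modify m 0 (· + 1))
      ((PySem.List.pyRange 1 (n + 1) 1).foldl (fun d v => d.insert v (0 : Int)) PySem.Dict.empty)).keys.Nodup := by
    rw [hckeys]; exact hRnd
  rw [PySem.Dict.items_eq_map_keys _ hcnodup 0, hckeys]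
  apply List.map_congr_left
  intro v hv
  rw [PySem.Dict.getD_foldl_modify_add_one]
  have hinit_getD : ((PySem.List.pyRange 1 (n + 1) 1).foldl (fun d v => d.insert v (0 : Int)) PySem.Dict.empty).getD v 0 = 0 := by
    apply PySem.Dict.getD_of_mem_items
    · rw [hinit_items]; exact List.mem_map_of_mem hv
    · rw [hinit_keys]; exact hRnd
  rw [hinit_getD]
  simp

-- getD of the 1..n-initialised counting dict, for keys in range
theorem pvCnt2_getD (n : Int) (ms : List Int) (h : ∀ m ∈ ms, m ∈ PySem.List.pyRange 1 (n + 1) 1)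
    (v : Int) (hv : v ∈ PySem.List.pyRange 1 (n + 1) 1) :
    (ms.foldl (fun d m => d.modify m 0 (· + 1))
      ((PySem.List.pyRange 1 (n + 1) 1).foldl (fun d v => d.insert v (0 : Int)) PySem.Dict.empty)).getD v 0
      = (ms.count v : Int) := by
  have hitems := pvCounts_items n ms h
  apply PySem.Dict.getD_of_mem_items
  · rw [hitems]
    exact List.mem_map_of_mem hv
  · have : (ms.foldl (fun d m => d.modify m 0 (· + 1))
        ((PySem.List.pyRange 1 (n + 1) 1).foldl (fun d v => d.insert v (0 : Int)) PySem.Dict.empty)).keys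
        = PySem.List.pyRange 1 (n + 1) 1 := by
      simp only [PySem.Dict.keys, hitems, List.map_map]
      rw [show ((fun x : Int × Int => x.1) ∘ fun v : Int => (v, (ms.count v : Int))) = id from rfl, List.map_id]
    rw [this]
    exact PySem.List.nodup_pyRange_one 1 (n + 1)

-- ---------- the walk side: the in-range pointer function ----------

-- the pointer 'members[z - 1]' as a total function (used only on 1 ≤ z ≤ len)
def pvG (seq : List Int) (z : Int) : Int := (PySem.List.pyGet? seq (z - 1)).getD 0

def pvInR (N : Nat) (z : Int) : Prop := 1 ≤ z ∧ z ≤ (N : Int)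

theorem pvG_get (seq : List Int) (z : Int) (h : pvInR seq.length z) :
    PySem.List.pyGet? seq (z - 1) = some (pvG seq z) := by
  obtain ⟨h1, h2⟩ := h
  rw [PySem.List.pyGet?_eq_some_getElem seq (by omega) (by omega)]
  rw [pvG, PySem.List.pyGet?_eq_some_getElem seq (by omega) (by omega)]
  rfl

theorem pvG_mem (seq : List Int) (z : Int) (h : pvInR seq.length z) : pvG seq z ∈ seq :=
  PySem.List.mem_of_pyGet?_eq_some seq (pvG_get seq z h)

-- iterates of an in-range-closed map stay in range
theorem pvIter_inR (N : Nat) (g : Int → Int) (hg : ∀ z, pvInR N z → pvInR N (g z)) :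
    ∀ (k : Nat) (z : Int), pvInR N z → pvInR N (g^[k] z) := by
  intro k
  induction k with
  | zero => intro z hz; exact hz
  | succ m ih =>
    intro z hz
    rw [Function.iterate_succ_apply]
    exact ih (g z) (hg z hz)

-- Nodup of a map over range = injectivity below N
theorem pvNodupRange_inj {α : Type} [DecidableEq α] {f : Nat → α} {N : Nat}
    (h : ((List.range N).map f).Nodup) {i j : Nat} (hi : i < N) (hj : j < N) (hf : f i = f j) : i = j :=
  (List.nodup_map_iff_inj_on List.nodup_range).mp h i (List.mem_range.mpr hi) j (List.mem_range.mpr hj) hf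

theorem pvNodupRange_of_inj {α : Type} [DecidableEq α] {f : Nat → α} {N : Nat}
    (h : ∀ i j, i < N → j < N → f i = f j → i = j) : ((List.range N).map f).Nodup :=
  (List.nodup_map_iff_inj_on List.nodup_range).mpr
    (fun i hi j hj hf => h i j (List.mem_range.mp hi) (List.mem_range.mp hj) hf)

-- distinct in-range iterate lists cover every in-range value
theorem pvCoverage {f : Nat → Int} {N : Nat}
    (hnd : ((List.range N).map f).Nodup) (hin : ∀ i, i < N → pvInR N (f i))
    (w : Int) (hw : pvInR N w) : ∃ j, j < N ∧ f j = w := by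
  have hsub : ((List.range N).map f).toFinset ⊆ Finset.Ico (1 : Int) ((N : Int) + 1) := by
    intro z hz
    rw [List.mem_toFinset] at hz
    obtain ⟨i, hi, rfl⟩ := List.mem_map.mp hz
    have := hin i (List.mem_range.mp hi)
    rw [Finset.mem_Ico]
    exact ⟨this.1, by have := this.2; omega⟩
  have hcard : ((List.range N).map f).toFinset.card = N := by
    rw [List.toFinset_card_of_nodup hnd]
    simp
  have hIcoCard : (Finset.Ico (1 : Int) ((N : Int) + 1)).card = N := by
    rw [Int.card_Ico]; omega
  have heq : ((List.range N).map f).toFinset = Finset.Ico (1 : Int) ((N : Int) + 1) :=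
    Finset.eq_of_subset_of_card_le hsub (by omega)
  have hwmem : w ∈ ((List.range N).map f).toFinset := by
    rw [heq, Finset.mem_Ico]; exact ⟨hw.1, by have := hw.2; omega⟩
  rw [List.mem_toFinset] at hwmem
  obtain ⟨i, hi, hfi⟩ := List.mem_map.mp hwmem
  exact ⟨i, List.mem_range.mp hi, hfi⟩

-- ---------- CORE: the edited graph is one n-cycle iff the original edges are a
-- ---------- Hamiltonian path from x whose endpoint is the edited node t ----------

theorem pvCore (N : Nat) (hN : 2 ≤ N) (g g' : Int → Int) (x t : Int)
    (hg : ∀ z, pvInR N z → pvInR N (g z)) (hx : pvInR N x) (ht : pvInR N t)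
    (hg' : ∀ z, pvInR N z → g' z = if z = t then x else g z) :
    ((((List.range N).map (fun i => g'^[i + 1] 1)).Nodup ∧ g'^[N] 1 = 1)
      ↔ (((List.range N).map (fun i => g^[i] x)).Nodup ∧ g^[N - 1] x = t)) := by
  have h1R : pvInR N 1 := ⟨le_refl _, by omega⟩
  have hg'cl : ∀ z, pvInR N z → pvInR N (g' z) := by
    intro z hz
    rw [hg' z hz]
    split
    · exact hx
    · exact hg z hz
  have hcR : ∀ i, pvInR N (g'^[i] 1) := fun i => pvIter_inR N g' hg'cl i 1 h1R
  have hpR : ∀ i, pvInR N (g^[i] x) := fun i => pvIter_inR N g hg i x hx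
  constructor
  · -- A-success → Hamiltonian path ending at t
    rintro ⟨hnd, hret⟩
    -- periodicity of c
    have hper : ∀ i, g'^[i + N] 1 = g'^[i] 1 := by
      intro i
      rw [Function.iterate_add_apply, hret]
    -- find m < N with c (m+1) = t
    obtain ⟨m, hm, hmt⟩ := pvCoverage hnd (fun i _ => hcR (i + 1)) t ht
    -- every index of the form m + 2 + a (a < N) reduces to a window index r < N
    have hred : ∀ a, a < N → ∃ r, r < N ∧ g'^[m + 2 + a] 1 = g'^[r + 1] 1 ∧
        (r + 1 = m + 2 + a ∨ r + 1 + N = m + 2 + a) := by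
      intro a ha
      rcases Nat.lt_or_ge (m + 2 + a) (N + 1) with hlt | hge
      · -- m + 2 + a ≤ N : take r = m + 1 + a
        exact ⟨m + 1 + a, by omega, by rw [show (m + 1 + a) + 1 = m + 2 + a from by omega], by omega⟩
      · -- m + 2 + a > N : subtract N
        refine ⟨m + 2 + a - N - 1, by omega, ?_, by omega⟩
        rw [show (m + 2 + a - N - 1) + 1 = m + 2 + a - N from by omega]
        conv_lhs => rw [show m + 2 + a = (m + 2 + a - N) + N from by omega]
        rw [hper]
    -- c (m+2) = x
    have hstep : g'^[m + 2] 1 = x := by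
      have : g'^[m + 2] 1 = g' (g'^[m + 1] 1) := by
        rw [show m + 2 = (m + 1) + 1 from rfl, Function.iterate_succ_apply']
      rw [this, hmt, hg' t ht, if_pos rfl]
    -- p i = c (m + 2 + i) for i ≤ N - 1
    have hp : ∀ i, i ≤ N - 1 → g^[i] x = g'^[m + 2 + i] 1 := by
      intro i
      induction i with
      | zero => intro _; simpa using hstep.symm
      | succ k ih =>
        intro hk
        have hk' : k ≤ N - 1 := by omega
        have hkk : k < N - 1 := by omega
        -- c (m+2+k) ≠ t, because its window index differs from m
        have hne : g'^[m + 2 + k] 1 ≠ t := by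
          intro hbad
          obtain ⟨r, hr, hre, hrlin⟩ := hred k (by omega)
          have hidx : g'^[r + 1] 1 = g'^[m + 1] 1 := by rw [← hre, hbad, hmt]
          have := pvNodupRange_inj hnd hr hm hidx
          omega
        have : g^[k + 1] x = g (g^[k] x) := Function.iterate_succ_apply' g k x
        rw [this, ih hk']
        have hcm : pvInR N (g'^[m + 2 + k] 1) := hcR _
        have hgg := hg' (g'^[m + 2 + k] 1) hcm
        rw [if_neg hne] at hgg
        rw [← hgg, ← Function.iterate_succ_apply' g' (m + 2 + k) 1]
        rfl
    -- endpoint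
    have hend : g^[N - 1] x = t := by
      rw [hp (N - 1) (le_refl _)]
      have : m + 2 + (N - 1) = (m + 1) + N := by omega
      rw [this, hper, hmt]
    refine ⟨?_, hend⟩
    -- Nodup of the p-list
    apply pvNodupRange_of_inj
    intro i j hi hj hij
    rw [hp i (by omega), hp j (by omega)] at hij
    obtain ⟨ri, hri, hei, hli⟩ := hred i hi
    obtain ⟨rj, hrj, hej, hlj⟩ := hred j hj
    rw [hei, hej] at hij
    have := pvNodupRange_inj hnd hri hrj hij
    omega
  · -- Hamiltonian path ending at t → A-success
    rintro ⟨hnd, hend⟩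
    -- find j < N with p j = 1
    obtain ⟨j, hj, hj1⟩ := pvCoverage hnd (fun i _ => hpR i) 1 h1R
    -- step relation: g' (p i) = p ((i+1) % N)
    have hstep : ∀ i, i < N → g' (g^[i] x) = g^[(i + 1) % N] x := by
      intro i hi
      rcases Nat.lt_or_ge i (N - 1) with hlt | hge
      · have hne : g^[i] x ≠ t := by
          intro hbad
          rw [← hend] at hbad
          have := pvNodupRange_inj hnd hi (by omega : N - 1 < N) hbad
          omega
        rw [hg' _ (hpR i), if_neg hne, Nat.mod_eq_of_lt (by omega)]
        exact (Function.iterate_succ_apply' g i x).symm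
      · have hieq : i = N - 1 := by omega
        subst hieq
        rw [hend, hg' t ht, if_pos rfl, show (N - 1 + 1) = N from by omega, Nat.mod_self]
        rfl
    -- c k = p ((j + k) % N)
    have hc : ∀ k, g'^[k] 1 = g^[(j + k) % N] x := by
      intro k
      induction k with
      | zero => simpa [Nat.mod_eq_of_lt hj] using hj1.symm
      | succ k ih =>
        rw [Function.iterate_succ_apply', ih, hstep _ (Nat.mod_lt _ (by omega))]
        have hidx : ((j + k) % N + 1) % N = (j + (k + 1)) % N := by
          conv_rhs => rw [show j + (k + 1) = (j + k) + 1 from by omega]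
          rw [Nat.add_mod (j + k) 1 N, Nat.mod_eq_of_lt (show 1 < N from by omega)]
        rw [hidx]
    constructor
    · -- Nodup of the c-list
      apply pvNodupRange_of_inj
      intro a b ha hb hab
      rw [hc (a + 1), hc (b + 1)] at hab
      have hia : (j + (a + 1)) % N < N := Nat.mod_lt _ (by omega)
      have hib : (j + (b + 1)) % N < N := Nat.mod_lt _ (by omega)
      have hmod := pvNodupRange_inj hnd hia hib hab
      rcases Nat.le_total a b with hle | hle
      · have hme : (j + (a + 1)) ≡ (j + (b + 1)) [MOD N] := hmod
        have hdvd := (Nat.modEq_iff_dvd' (by omega)).mp hme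
        rcases Nat.eq_zero_or_pos (j + (b + 1) - (j + (a + 1))) with h0 | hpos
        · omega
        · exfalso
          have := Nat.le_of_dvd hpos hdvd
          omega
      · have hme : (j + (b + 1)) ≡ (j + (a + 1)) [MOD N] := hmod.symm
        have hdvd := (Nat.modEq_iff_dvd' (by omega : j + (b + 1) ≤ j + (a + 1))).mp hme
        rcases Nat.eq_zero_or_pos (j + (a + 1) - (j + (b + 1))) with h0 | hpos
        · omega
        · exfalso
          have := Nat.le_of_dvd hpos hdvd
          omega
    · -- return to 1 after exactly N steps
      rw [hc N, show (j + N) % N = j from by rw [Nat.add_mod_right]; exact Nat.mod_eq_of_lt hj]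
      exact hj1

-- ---------- characterization of A's is_sequence ----------

theorem pvAIsSeq_char_aux (seq : List Int) (hN : 1 ≤ seq.length)
    (hcl : ∀ z, pvInR seq.length z → pvInR seq.length (pvG seq z)) :
    ∀ (fuel j : Nat) (uniq : PySem.Set Int) (pos : Int),
      fuel + j = seq.length →
      pos = (pvG seq)^[j] 1 →
      uniq = (List.range j).map (fun i => (pvG seq)^[i + 1] 1) →
      uniq.Nodup → (1 : Int) ∉ uniq →
      (pvAIsSeq seq fuel uniq pos = true ↔
        (((List.range seq.length).map (fun i => (pvG seq)^[i + 1] 1)).Nodup ∧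
          (pvG seq)^[seq.length] 1 = 1)) := by
  have h1R : pvInR seq.length 1 := ⟨le_refl _, by exact_mod_cast hN⟩
  intro fuel
  induction fuel with
  | zero =>
    intro j uniq pos hfj hpos huniq hnd h1
    have hj : j = seq.length := by omega
    subst hj
    rw [show pvAIsSeq seq 0 uniq pos = false from rfl]
    constructor
    · intro h; exact absurd h (by simp)
    · rintro ⟨hnd', hret⟩
      exfalso
      apply h1
      rw [huniq]
      refine List.mem_map.mpr ⟨seq.length - 1, List.mem_range.mpr (by omega), ?_⟩
      rw [show (seq.length - 1) + 1 = seq.length from by omega, hret]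
  | succ f ih =>
    intro j uniq pos hfj hpos huniq hnd h1
    have hjN : j < seq.length := by omega
    have hposR : pvInR seq.length pos := by
      rw [hpos]; exact pvIter_inR seq.length (pvG seq) hcl j 1 h1R
    have hp : pvG seq pos = (pvG seq)^[j + 1] 1 := by
      rw [hpos]
      exact (Function.iterate_succ_apply' (pvG seq) j 1).symm
    rw [show pvAIsSeq seq (f + 1) uniq pos =
        (match PySem.List.pyGet? seq (pos - 1) with
          | none => false
          | some p =>
            if PySem.Set.contains uniq p then false
            else
              let u := PySem.Set.add uniq p
              if p == 1 then PySem.Set.len u == PySem.List.len seq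
              else pvAIsSeq seq f u p) from rfl,
      pvG_get seq pos hposR]
    simp only
    by_cases hmem : pvG seq pos ∈ uniq
    · rw [if_pos ((PySem.Set.contains_iff uniq (pvG seq pos)).mpr hmem)]
      constructor
      · intro h; exact absurd h (by simp)
      · rintro ⟨hnd', hret⟩
        exfalso
        rw [huniq] at hmem
        obtain ⟨i, hi, hie⟩ := List.mem_map.mp hmem
        have hiN : i < seq.length := by have := List.mem_range.mp hi; omega
        rw [hp] at hie
        have := pvNodupRange_inj hnd' hiN hjN hie
        have := List.mem_range.mp hi
        omega
    · have hc : PySem.Set.contains uniq (pvG seq pos) = false := by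
        rw [Bool.eq_false_iff]
        intro hcc
        exact hmem ((PySem.Set.contains_iff uniq (pvG seq pos)).mp hcc)
      rw [hc]
      simp only [Bool.false_eq_true, if_false]
      have hadd : PySem.Set.add uniq (pvG seq pos) = uniq ++ [pvG seq pos] :=
        PySem.Set.add_of_not_mem hmem
      have hulen : uniq.length = j := by rw [huniq]; simp
      have huniq' : uniq ++ [pvG seq pos] = (List.range (j + 1)).map (fun i => (pvG seq)^[i + 1] 1) := by
        rw [List.range_succ, List.map_append, ← huniq]
        simp [hp]
      have hnd' : (uniq ++ [pvG seq pos]).Nodup :=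
        List.Nodup.append hnd (List.nodup_singleton _)
          (by intro a ha hb; simp only [List.mem_singleton] at hb; subst hb; exact hmem ha)
      by_cases hp1 : pvG seq pos = 1
      · rw [if_pos (by simpa using hp1)]
        have hlenu : PySem.Set.len (PySem.Set.add uniq (pvG seq pos)) = ((j : Int) + 1) := by
          rw [hadd]
          show ((uniq ++ [pvG seq pos]).length : Int) = (j : Int) + 1
          simp [hulen]
        rw [hlenu]
        show ((((j : Int) + 1) == (seq.length : Int)) = true ↔ _)
        by_cases hjN1 : j + 1 = seq.length
        · have hT : (((j : Int) + 1) == (seq.length : Int)) = true := by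
            simp only [beq_iff_eq]
            exact_mod_cast congrArg (fun k : Nat => (k : Int)) hjN1
          have hndN : ((List.range seq.length).map (fun i => (pvG seq)^[i + 1] 1)).Nodup := by
            rw [← hjN1, ← huniq']
            exact hnd'
          have hretN : (pvG seq)^[seq.length] 1 = 1 := by
            rw [← hjN1, ← hp, hp1]
          rw [hT]
          exact ⟨fun _ => ⟨hndN, hretN⟩, fun _ => rfl⟩
        · have hF : (((j : Int) + 1) == (seq.length : Int)) = false := by
            simp only [beq_eq_false_iff_ne, ne_eq]
            intro hbad
            exact hjN1 (by exact_mod_cast hbad)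
          rw [hF]
          constructor
          · intro h; exact absurd h (by simp)
          · rintro ⟨hndN, hret⟩
            exfalso
            have h1e : (pvG seq)^[(seq.length - 1) + 1] 1 = (pvG seq)^[j + 1] 1 := by
              rw [show (seq.length - 1) + 1 = seq.length from by omega, hret, ← hp, hp1]
            have := pvNodupRange_inj hndN (by omega : seq.length - 1 < seq.length) hjN h1e
            omega
      · rw [if_neg (by simpa using hp1)]
        rw [hadd]
        exact ih (j + 1) (uniq ++ [pvG seq pos]) (pvG seq pos) (by omega) hp huniq' hnd'
          (by
            intro hbad
            rcases List.mem_append.mp hbad with hin | hin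
            · exact h1 hin
            · simp only [List.mem_singleton] at hin
              exact hp1 hin.symm)

-- ---------- characterization of B's walk ----------

theorem pvBWalk_spec (members : List Int)
    (hcl : ∀ z, pvInR members.length z → pvInR members.length (pvG members z)) :
    ∀ (k : Nat) (pos : Int) (seen : PySem.Set Int), pvInR members.length pos →
      pvBWalk members k pos seen =
        ((pvG members)^[k] pos,
          PySem.Set.update seen ((List.range k).map (fun i => (pvG members)^[i + 1] pos))) := by
  intro k
  induction k with
  | zero =>
    intro pos seen hpos
    simp [pvBWalk, PySem.Set.update]
  | succ m ih =>
    intro pos seen hpos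
    rw [show pvBWalk members (m + 1) pos seen =
        (match PySem.List.pyGet? members (pos - 1) with
          | none => (pos, seen)
          | some p => pvBWalk members m p (PySem.Set.add seen p)) from rfl,
      pvG_get members pos hpos]
    simp only
    rw [ih (pvG members pos) (PySem.Set.add seen (pvG members pos)) (hcl pos hpos)]
    have h1 : (pvG members)^[m] (pvG members pos) = (pvG members)^[m + 1] pos :=
      (Function.iterate_succ_apply (pvG members) m pos).symm
    have h2 : (List.range (m + 1)).map (fun i => (pvG members)^[i + 1] pos) =
        (pvG members pos) :: (List.range m).map (fun i => (pvG members)^[i + 1] (pvG members pos)) := by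
      rw [List.range_succ_eq_map, List.map_cons, List.map_map]
      refine congrArg₂ _ (by simp) ?_
      apply List.map_congr_left
      intro i _
      exact Function.iterate_succ_apply (pvG members) (i + 1) pos
    rw [h1, h2]
    rfl

-- number of distinct elements equals the length exactly for duplicate-free lists
theorem pvOfListLen (L : List Int) : ((PySem.Set.ofList L).length = L.length) ↔ L.Nodup := by
  have h1 : (PySem.Set.ofList L).length = L.dedup.length := by
    rw [← List.card_toFinset, ← List.toFinset_card_of_nodup (PySem.Set.nodup_ofList L)]
    congr 1
    ext z
    simp [PySem.Set.mem_ofList]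
  rw [h1]
  constructor
  · intro h
    rw [← List.dedup_eq_self]
    exact (List.dedup_sublist L).eq_of_length h
  · intro h
    rw [List.dedup_eq_self.mpr h]

-- ---------- the search equivalence ----------

-- A's scan returns '-1 -1' when every admissible candidate fails
theorem pvASearch_fail (members : List Int) (x y : Int)
    (hfail : ∀ (k : Nat) (h : k < members.length), members[k] = y → ((k : Int) + 1) ≠ x →
      pvAIsSeq (members.set k x) (members.set k x).length PySem.Set.empty 1 = false) :
    ∀ l : List (Int × Int),
      (∀ p ∈ l, ∃ (k : Nat) (_ : k < members.length), p = ((k : Int), members[k])) →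
      pvASearch (some y) (some x) members l = "-1 -1" := by
  intro l
  induction l with
  | nil => intro _; rfl
  | cons pc rest ih =>
    intro hsh
    obtain ⟨k, hk, hpc⟩ := hsh pc (List.mem_cons_self)
    subst hpc
    rw [pvASearch]
    by_cases hg : (some y == some (members[k]) && !(some x == some ((k : Int) + 1))) = true
    · rw [if_pos hg]
      rw [Bool.and_eq_true] at hg
      obtain ⟨hg1, hg2⟩ := hg
      have hy : members[k] = y := by
        have := beq_iff_eq.mp hg1; simpa using this.symm
      have hne : ((k : Int) + 1) ≠ x := by
        simp only [Bool.not_eq_true', beq_eq_false_iff_ne, ne_eq, Option.some.injEq] at hg2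
        exact fun h => hg2 h.symm
      simp only [Int.toNat_natCast, hfail k hk hy hne, Bool.false_eq_true, if_false]
      exact ih (fun p hp => hsh p (List.mem_cons_of_mem _ hp))
    · rw [if_neg hg]
      exact ih (fun p hp => hsh p (List.mem_cons_of_mem _ hp))

-- A's scan returns the unique successful candidate
theorem pvASearch_found (members : List Int) (x y : Int) (k0 : Nat) (hk0 : k0 < members.length)
    (hy : members[k0] = y) (hne : ((k0 : Int) + 1) ≠ x)
    (hsucc : pvAIsSeq (members.set k0 x) (members.set k0 x).length PySem.Set.empty 1 = true)
    (hfail : ∀ (k : Nat) (h : k < members.length), k ≠ k0 → members[k] = y → ((k : Int) + 1) ≠ x →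
      pvAIsSeq (members.set k x) (members.set k x).length PySem.Set.empty 1 = false) :
    ∀ l : List (Int × Int),
      (∀ p ∈ l, ∃ (k : Nat) (_ : k < members.length), p = ((k : Int), members[k])) →
      (((k0 : Int), y) ∈ l) →
      pvASearch (some y) (some x) members l
        = PySem.Int.toStr ((k0 : Int) + 1) ++ " " ++ PySem.Int.toStr x := by
  intro l
  induction l with
  | nil => intro _ hm; exact absurd hm (by simp)
  | cons pc rest ih =>
    intro hsh hm
    obtain ⟨k, hk, hpc⟩ := hsh pc (List.mem_cons_self)
    subst hpc
    rw [pvASearch]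
    by_cases hkk : k = k0
    · subst hkk
      rw [if_pos (by simp [hy, hne.symm])]
      have hsucc' : pvAIsSeq (members.set k x) members.length [] 1 = true := by
        simpa [List.length_set] using hsucc
      simp [Int.toNat_natCast, hsucc']
    · by_cases hg : (some y == some (members[k]) && !(some x == some ((k : Int) + 1))) = true
      · rw [if_pos hg]
        rw [Bool.and_eq_true] at hg
        obtain ⟨hg1, hg2⟩ := hg
        have hyk : members[k] = y := by
          have := beq_iff_eq.mp hg1; simpa using this.symm
        have hnek : ((k : Int) + 1) ≠ x := by
          simp only [Bool.not_eq_true', beq_eq_false_iff_ne, ne_eq, Option.some.injEq] at hg2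
          exact fun h => hg2 h.symm
        simp only [Int.toNat_natCast, hfail k hk hkk hyk hnek, Bool.false_eq_true, if_false]
        refine ih (fun p hp => hsh p (List.mem_cons_of_mem _ hp)) ?_
        rcases List.mem_cons.mp hm with heq | hmem
        · exfalso
          have : (k0 : Int) = (k : Int) := congrArg Prod.fst heq
          exact hkk (by exact_mod_cast this.symm)
        · exact hmem
      · rw [if_neg hg]
        refine ih (fun p hp => hsh p (List.mem_cons_of_mem _ hp)) ?_
        rcases List.mem_cons.mp hm with heq | hmem
        · exfalso
          have : (k0 : Int) = (k : Int) := congrArg Prod.fst heq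
          exact hkk (by exact_mod_cast this.symm)
        · exact hmem

theorem pvSearchEq (n : Int) (members : List Int) (x y : Int)
    (hn : 2 ≤ n)
    (hlen : (members.length : Int) = n)
    (hmem : ∀ m ∈ members, 1 ≤ m ∧ m ≤ n)
    (hx : 1 ≤ x ∧ x ≤ n) :
    pvASearch (some y) (some x) members (PySem.List.enumerate members 0) =
      (let r := pvBWalk members (n - 1).toNat x (PySem.Set.add PySem.Set.empty x);
       if (PySem.Set.len r.2 == n && (PySem.List.pyGet? members (r.1 - 1) == some y)) then
         PySem.Int.toStr r.1 ++ " " ++ PySem.Int.toStr x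
       else "-1 -1") := by
  have hN2 : 2 ≤ members.length := by omega
  have hg : ∀ z, pvInR members.length z → pvInR members.length (pvG members z) := by
    intro z hz
    have hmm := hmem _ (pvG_mem members z hz)
    exact ⟨hmm.1, by omega⟩
  have hxR : pvInR members.length x := ⟨hx.1, by omega⟩
  have h1R : pvInR members.length 1 := ⟨le_refl _, by omega⟩
  have htoNat : (n - 1).toNat = members.length - 1 := by omega
  -- reduce B's walk
  have hpL_cons : (List.range members.length).map (fun i => (pvG members)^[i] x)
      = x :: (List.range (members.length - 1)).map (fun i => (pvG members)^[i + 1] x) := by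
    conv_lhs => rw [show members.length = (members.length - 1) + 1 from by omega]
    rw [List.range_succ_eq_map, List.map_cons, List.map_map]
    refine congrArg₂ _ (by simp) (List.map_congr_left ?_)
    intro i _
    rfl
  have hupdate : PySem.Set.update (PySem.Set.add PySem.Set.empty x)
        ((List.range (members.length - 1)).map (fun i => (pvG members)^[i + 1] x))
      = PySem.Set.ofList ((List.range members.length).map (fun i => (pvG members)^[i] x)) := by
    rw [hpL_cons, PySem.Set.ofList_eq_foldl]
    rfl
  have hwalk : pvBWalk members (n - 1).toNat x (PySem.Set.add PySem.Set.empty x)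
      = ((pvG members)^[members.length - 1] x,
        PySem.Set.ofList ((List.range members.length).map (fun i => (pvG members)^[i] x))) := by
    rw [htoNat, pvBWalk_spec members hg (members.length - 1) x _ hxR, hupdate]
  simp only [hwalk]
  have htR : pvInR members.length ((pvG members)^[members.length - 1] x) :=
    pvIter_inR members.length (pvG members) hg (members.length - 1) x hxR
  -- the candidate characterization: editing position k works iff the original walk is a
  -- Hamiltonian path from x ending at node k+1
  have hcand : ∀ (k : Nat), k < members.length →
      (pvAIsSeq (members.set k x) (members.set k x).length PySem.Set.empty 1 = true ↔
        (((List.range members.length).map (fun i => (pvG members)^[i] x)).Nodup ∧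
          (pvG members)^[members.length - 1] x = (k : Int) + 1)) := by
    intro k hk
    have hslen : (members.set k x).length = members.length := List.length_set ..
    have hgs : ∀ z, pvInR members.length z →
        pvG (members.set k x) z = if z = (k : Int) + 1 then x else pvG members z := by
      intro z hz
      by_cases hzk : z = (k : Int) + 1
      · rw [if_pos hzk]
        unfold pvG
        rw [hzk, show (k : Int) + 1 - 1 = (k : Int) from by ring, PySem.List.pyGet?_natCast,
          List.getElem?_set_self hk]
        rfl
      · rw [if_neg hzk]
        obtain ⟨hz1, hz2⟩ := hz
        unfold pvG
        have hz0 : 0 ≤ z - 1 := by omega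
        have hne' : k ≠ (z - 1).toNat := by omega
        rw [PySem.List.pyGet?_of_nonneg (members.set k x) hz0,
          PySem.List.pyGet?_of_nonneg members hz0, List.getElem?_set_ne hne']
    have hclseq : ∀ z, pvInR (members.set k x).length z →
        pvInR (members.set k x).length (pvG (members.set k x) z) := by
      rw [hslen]
      intro z hz
      rw [hgs z hz]
      split
      · exact hxR
      · exact hg z hz
    have hchar := pvAIsSeq_char_aux (members.set k x) (by omega) hclseq
      (members.set k x).length 0 PySem.Set.empty 1 (by omega) rfl (by simp [PySem.Set.empty])
      (by simp [PySem.Set.empty]) (by simp [PySem.Set.empty])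
    rw [hchar]
    have hcore := pvCore members.length hN2 (pvG members) (pvG (members.set k x)) x ((k : Int) + 1)
      hg hxR ⟨by omega, by omega⟩ hgs
    rw [show (members.set k x).length = members.length from hslen]
    exact hcore
  have hshape : ∀ p ∈ PySem.List.enumerate members 0,
      ∃ (k : Nat) (_ : k < members.length), p = ((k : Int), members[k]) := by
    intro p hp
    obtain ⟨k, hk, hpe⟩ := (PySem.List.mem_enumerate_iff members 0 p).mp hp
    exact ⟨k, hk, by simpa using hpe⟩
  by_cases hBS : ((List.range members.length).map (fun i => (pvG members)^[i] x)).Nodup ∧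
      pvG members ((pvG members)^[members.length - 1] x) = y
  · -- the walk succeeds; both sides return the same string
    obtain ⟨hnd, hgy⟩ := hBS
    set t := (pvG members)^[members.length - 1] x with htdef
    have hk0 : (t - 1).toNat < members.length := by
      obtain ⟨h1, h2⟩ := htR; omega
    set k0 : Nat := (t - 1).toNat with hk0def
    have hk0t : (k0 : Int) + 1 = t := by
      obtain ⟨h1, h2⟩ := htR; omega
    have hmemk0 : members[k0] = y := by
      have h1 := pvG_get members t htR
      have h2 := PySem.List.pyGet?_eq_some_getElem members (i := t - 1)
        (by obtain ⟨a, b⟩ := htR; omega) (by obtain ⟨a, b⟩ := htR; omega)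
      rw [h1] at h2
      have := Option.some.inj h2
      rw [← this, hgy]
    have htx : t ≠ x := by
      intro hbad
      have h0 : (pvG members)^[members.length - 1] x = (pvG members)^[0] x := by
        simpa [htdef] using hbad
      have := pvNodupRange_inj hnd (by omega : members.length - 1 < members.length)
        (by omega : 0 < members.length) h0
      omega
    have hne : ((k0 : Int) + 1) ≠ x := by rw [hk0t]; exact htx
    have hsucc := (hcand k0 hk0).mpr ⟨hnd, hk0t.symm⟩
    have hfail : ∀ (k : Nat) (h : k < members.length), k ≠ k0 → members[k] = y →
        ((k : Int) + 1) ≠ x →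
        pvAIsSeq (members.set k x) (members.set k x).length PySem.Set.empty 1 = false := by
      intro k hk hkk _ _
      rw [Bool.eq_false_iff]
      intro htrue
      obtain ⟨-, hteq⟩ := (hcand k hk).mp htrue
      apply hkk
      have : (k : Int) = (k0 : Int) := by omega
      exact_mod_cast this
    rw [pvASearch_found members x y k0 hk0 hmemk0 hne hsucc hfail
      (PySem.List.enumerate members 0) hshape
      ((PySem.List.mem_enumerate_iff members 0 _).mpr ⟨k0, hk0, by simp [hmemk0]⟩)]
    have hlencond : (PySem.Set.len (PySem.Set.ofList
        ((List.range members.length).map (fun i => (pvG members)^[i] x))) == n) = true := by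
      simp only [beq_iff_eq]
      show ((PySem.Set.ofList ((List.range members.length).map (fun i => (pvG members)^[i] x))).length : Int) = n
      rw [(pvOfListLen _).mpr hnd]
      simp only [List.length_map, List.length_range]
      exact hlen
    have hgetcond : (PySem.List.pyGet? members (t - 1) == some y) = true := by
      rw [pvG_get members t htR]
      simp [hgy]
    have hcond : ((PySem.Set.len (PySem.Set.ofList
          ((List.range members.length).map (fun i => (pvG members)^[i] x))) == n) &&
        (PySem.List.pyGet? members (t - 1) == some y)) = true := by
      rw [hlencond, hgetcond]
      rfl
    rw [if_pos hcond, hk0t]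
  · -- the walk fails; both sides return '-1 -1'
    have hguard : (PySem.Set.len (PySem.Set.ofList
          ((List.range members.length).map (fun i => (pvG members)^[i] x))) == n &&
        (PySem.List.pyGet? members ((pvG members)^[members.length - 1] x - 1) == some y)) = false := by
      rw [Bool.eq_false_iff]
      intro htrue
      rw [Bool.and_eq_true] at htrue
      obtain ⟨h1, h2⟩ := htrue
      apply hBS
      constructor
      · have h1' : ((PySem.Set.ofList ((List.range members.length).map
            (fun i => (pvG members)^[i] x))).length : Int) = n := by
          exact_mod_cast beq_iff_eq.mp h1
        refine (pvOfListLen _).mp ?_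
        simp only [List.length_map, List.length_range]
        omega
      · rw [pvG_get members _ htR] at h2
        simpa using beq_iff_eq.mp h2
    rw [hguard]
    simp only [Bool.false_eq_true, if_false]
    apply pvASearch_fail members x y ?_ (PySem.List.enumerate members 0) hshape
    intro k hk hky hnk
    rw [Bool.eq_false_iff]
    intro htrue
    obtain ⟨hnd, hteq⟩ := (hcand k hk).mp htrue
    apply hBS
    refine ⟨hnd, ?_⟩
    rw [hteq]
    unfold pvG
    rw [show (k : Int) + 1 - 1 = (k : Int) from by ring, PySem.List.pyGet?_natCast,
      List.getElem?_eq_getElem hk]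
    exact hky

-- ---------- length of members equals n in the searching branch ----------

theorem pvIndicator (a : Int) : ∀ (rng : List Int), rng.Nodup → a ∈ rng →
    (rng.map (fun v => if v = a then (1 : Int) else 0)).sum = 1 := by
  intro rng
  induction rng with
  | nil => intro _ h; exact absurd h (by simp)
  | cons b t ih =>
    intro hnd ha
    rw [List.map_cons, List.sum_cons]
    rcases List.mem_cons.mp ha with rfl | hat
    · rw [if_pos rfl]
      have hnotin : a ∉ t := (List.nodup_cons.mp hnd).1
      have hz : (t.map (fun v => if v = a then (1 : Int) else 0)).sum = 0 := by
        apply List.sum_eq_zero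
        intro z hz
        obtain ⟨v, hv, hve⟩ := List.mem_map.mp hz
        rw [← hve, if_neg (fun h => hnotin (by rw [← h]; exact hv))]
      rw [hz]
      norm_num
    · have hba : b ≠ a := fun h => (List.nodup_cons.mp hnd).1 (h ▸ hat)
      rw [if_neg hba, ih (List.nodup_cons.mp hnd).2 hat]
      norm_num

theorem pvSumCount (rng : List Int) (hnd : rng.Nodup) : ∀ (ms : List Int),
    (∀ m ∈ ms, m ∈ rng) →
    (rng.map (fun v => (ms.count v : Int))).sum = (ms.length : Int) := by
  intro ms
  induction ms with
  | nil => intro _; simp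
  | cons a t ih =>
    intro h
    have hmap : rng.map (fun v => (((a :: t).count v : Nat) : Int))
        = rng.map (fun v => ((t.count v : Nat) : Int) + (if v = a then (1 : Int) else 0)) := by
      apply List.map_congr_left
      intro v _
      rw [List.count_cons]
      by_cases hva : v = a
      · simp [hva]
      · have h1 : (v == a) = false := beq_eq_false_iff_ne.mpr hva
        have h2 : ¬ a = v := fun h => hva h.symm
        simp [h1, hva, h2]
    rw [hmap, PySem.List.sum_map_add_int,
      ih (fun m hm => h m (List.mem_cons_of_mem a hm)),
      pvIndicator a rng hnd (h a List.mem_cons_self)]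
    simp only [List.length_cons]
    push_cast
    ring

theorem pvSumClassified (f : Int → Int) : ∀ (l : List Int), (∀ v ∈ l, 0 ≤ f v ∧ f v ≤ 2) →
    (l.map f).sum = (l.length : Int) - ((l.filter (fun v => f v == 0)).length : Int)
      + ((l.filter (fun v => f v == 2)).length : Int) := by
  intro l
  induction l with
  | nil => simp
  | cons a t ih =>
    intro h
    rw [List.map_cons, List.sum_cons, List.filter_cons, List.filter_cons,
      ih (fun v hv => h v (List.mem_cons_of_mem a hv))]
    obtain ⟨h0, h2⟩ := h a List.mem_cons_self
    have hft : (t.filter (fun v => f v == 0)).length ≤ t.length := List.length_filter_le _ _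
    have hft2 : (t.filter (fun v => f v == 2)).length ≤ t.length := List.length_filter_le _ _
    have : f a = 0 ∨ f a = 1 ∨ f a = 2 := by omega
    rcases this with hA | hA | hA <;> simp [hA] <;> push_cast <;> omega

theorem pvLen_eq (n : Int) (members : List Int)
    (hmem : ∀ m ∈ members, 1 ≤ m ∧ m ≤ n)
    (hM1 : ((PySem.List.pyRange 1 (n + 1) 1).filter (fun v => ((members.count v : Nat) : Int) == 0)).length = 1)
    (hD1 : ((PySem.List.pyRange 1 (n + 1) 1).filter (fun v => ((members.count v : Nat) : Int) == 2)).length = 1)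
    (hle : ∀ v ∈ PySem.List.pyRange 1 (n + 1) 1, ((members.count v : Nat) : Int) ≤ 2) :
    (members.length : Int) = n := by
  have hndR : (PySem.List.pyRange 1 (n + 1) 1).Nodup := PySem.List.nodup_pyRange_one 1 (n + 1)
  have hRlen : (PySem.List.pyRange 1 (n + 1) 1).length = (n + 1 - 1).toNat :=
    PySem.List.length_pyRange_one 1 (n + 1)
  have hsum1 := pvSumCount (PySem.List.pyRange 1 (n + 1) 1) hndR members
    (fun m hm => (PySem.List.mem_pyRange_one).mpr (by have := hmem m hm; omega))
  have hsum2 := pvSumClassified (fun v => ((members.count v : Nat) : Int))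
    (PySem.List.pyRange 1 (n + 1) 1)
    (fun v hv => ⟨Int.natCast_nonneg _, hle v hv⟩)
  rw [hsum1] at hsum2
  rw [hM1, hD1] at hsum2
  have hflen : 1 ≤ (PySem.List.pyRange 1 (n + 1) 1).length := by
    have := List.length_filter_le (fun v => ((members.count v : Nat) : Int) == 0)
      (PySem.List.pyRange 1 (n + 1) 1)
    omega
  omega

theorem full_answer_spec' (count_of_members : Int) (members : List Int)
    (hpre : Pre_full_answer count_of_members members) :
    full_answer count_of_members members = full_answer_alt count_of_members members := by
  obtain ⟨hmem, hcorner⟩ := hpre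
  have h_inR : ∀ m ∈ members, m ∈ PySem.List.pyRange 1 (count_of_members + 1) 1 := by
    intro m hm
    rw [PySem.List.mem_pyRange_one]
    have := hmem m hm; omega
  have hg0 : ∀ v : Int, 0 ≤ ((members.count v : Nat) : Int) := fun v => Int.natCast_nonneg _
  simp only [full_answer, full_answer_alt]
  have hinRp : ∀ m ∈ members, m ∈ PySem.List.pyRange 1 (count_of_members + 1) 1 := h_inR
  have hL0 : ((PySem.List.pyRange 1 (count_of_members + 1) 1).filter
        (fun v => ((members.foldl (fun d m => d.modify m 0 (· + 1))
          ((PySem.List.pyRange 1 (count_of_members + 1) 1).foldl (fun d v => d.insert v (0 : Int)) PySem.Dict.empty)).getD v 0 == (0 : Int))))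
      = ((PySem.List.pyRange 1 (count_of_members + 1) 1).filter (fun v => (((members.count v : Nat) : Int) == 0))) :=
    List.filter_congr (fun v hv => by rw [pvCnt2_getD count_of_members members hinRp v hv])
  have hL2 : ((PySem.List.pyRange 1 (count_of_members + 1) 1).filter
        (fun v => ((members.foldl (fun d m => d.modify m 0 (· + 1))
          ((PySem.List.pyRange 1 (count_of_members + 1) 1).foldl (fun d v => d.insert v (0 : Int)) PySem.Dict.empty)).getD v 0 == (2 : Int))))
      = ((PySem.List.pyRange 1 (count_of_members + 1) 1).filter (fun v => (((members.count v : Nat) : Int) == 2))) :=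
    List.filter_congr (fun v hv => by rw [pvCnt2_getD count_of_members members hinRp v hv])
  have hLgt : ((PySem.List.pyRange 1 (count_of_members + 1) 1).any
        (fun v => decide ((2 : Int) < (members.foldl (fun d m => d.modify m 0 (· + 1))
          ((PySem.List.pyRange 1 (count_of_members + 1) 1).foldl (fun d v => d.insert v (0 : Int)) PySem.Dict.empty)).getD v 0)))
      = ((PySem.List.pyRange 1 (count_of_members + 1) 1).any (fun v => decide ((2 : Int) < ((members.count v : Nat) : Int)))) :=
    PySem.List.any_congr_mem (fun v hv => by rw [pvCnt2_getD count_of_members members hinRp v hv])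
  rw [hL0, hL2, hLgt, pvCounts_items count_of_members members h_inR]
  by_cases hE : ((PySem.List.pyRange 1 (count_of_members + 1) 1).any (fun v => decide (2 < ((members.count v : Nat) : Int)))) = true
  · -- some value occurs more than twice: both sides give "-1 -1"
    have h3 : 3 ≤ pvS ((PySem.List.pyRange 1 (count_of_members + 1) 1).map (fun v => (v, ((members.count v : Nat) : Int)))) := by
      apply pvS_map_ge_three _ _ hg0
      obtain ⟨v, hv, hgt⟩ := List.any_eq_true.mp hE
      exact ⟨v, hv, by simpa using hgt⟩
    rw [if_pos (by simp only [hE, Bool.or_true])]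
    cases hcl : pvAClassify ((PySem.List.pyRange 1 (count_of_members + 1) 1).map (fun v => (v, ((members.count v : Nat) : Int)))) 0 none none with
    | none => rfl
    | some t =>
      obtain ⟨c, p, m⟩ := t
      obtain ⟨hc, -, -⟩ := pvAClassify_some hcl
      have hc0 : (c == 0) = false := beq_eq_false_iff_ne.mpr (by omega)
      have hc2 : (c == 2) = false := beq_eq_false_iff_ne.mpr (by omega)
      simp [hc0, hc2]
  · -- no value occurs more than twice
    have hEf : ((PySem.List.pyRange 1 (count_of_members + 1) 1).any (fun v => decide (2 < ((members.count v : Nat) : Int)))) = false :=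
      Bool.eq_false_iff.mpr hE
    have hle : ∀ v ∈ PySem.List.pyRange 1 (count_of_members + 1) 1, ((members.count v : Nat) : Int) ≤ 2 := by
      intro v hv
      by_contra hgt
      exact hE (List.any_eq_true.mpr ⟨v, hv, by simp; omega⟩)
    have hsum : pvS ((PySem.List.pyRange 1 (count_of_members + 1) 1).map (fun v => (v, ((members.count v : Nat) : Int))))
        = (((PySem.List.pyRange 1 (count_of_members + 1) 1).filter (fun v => ((members.count v : Nat) : Int) == 0)).length : Int)
          + (((PySem.List.pyRange 1 (count_of_members + 1) 1).filter (fun v => ((members.count v : Nat) : Int) == 2)).length : Int) :=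
      pvS_map_eq _ _ hg0 hle
    have hS2 : pvS ((PySem.List.pyRange 1 (count_of_members + 1) 1).map (fun v => (v, ((members.count v : Nat) : Int)))) ≤ 2
        ∨ 3 ≤ pvS ((PySem.List.pyRange 1 (count_of_members + 1) 1).map (fun v => (v, ((members.count v : Nat) : Int)))) := by omega
    by_cases hMD : ((PySem.List.pyRange 1 (count_of_members + 1) 1).filter (fun v => ((members.count v : Nat) : Int) == 0)).length = 1
        ∧ ((PySem.List.pyRange 1 (count_of_members + 1) 1).filter (fun v => ((members.count v : Nat) : Int) == 2)).length = 1
    · -- exactly one missing and one doubled value: A searches, B walks; pvSearchEq bridges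
      obtain ⟨hM1, hD1⟩ := hMD
      obtain ⟨x, hMx⟩ := List.length_eq_one_iff.mp hM1
      obtain ⟨y, hDy⟩ := List.length_eq_one_iff.mp hD1
      obtain ⟨⟨c, p, m⟩, hcl⟩ := pvAClassify_isSome ((PySem.List.pyRange 1 (count_of_members + 1) 1).map (fun v => (v, ((members.count v : Nat) : Int)))) 0 none none le_rfl
        (by rw [hsum, hM1, hD1]; norm_num)
      obtain ⟨hc, hp, hm⟩ := pvAClassify_some hcl
      rw [pvLastP_filter_singleton (fun v => v == 2) (fun v => ((members.count v : Nat) : Int)) _ none y hDy] at hp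
      rw [pvLastP_filter_singleton (fun v => v == 0) (fun v => ((members.count v : Nat) : Int)) _ none x hMx] at hm
      have hc2 : c = 2 := by rw [hc, hsum, hM1, hD1]; norm_num
      subst hp hm hc2
      rw [hcl]
      have e0 : ((2 : Int) == 0) = false := by decide
      have e2 : ((2 : Int) == 2) = true := by decide
      simp only [e0, e2, Bool.false_eq_true, if_false, if_true]
      -- B's guard is false here
      have b0 : (((PySem.List.pyRange 1 (count_of_members + 1) 1).filter (fun v => ((members.count v : Nat) : Int) == 0)).length == 1) = true :=
        beq_iff_eq.mpr hM1
      have b2 : (((PySem.List.pyRange 1 (count_of_members + 1) 1).filter (fun v => ((members.count v : Nat) : Int) == 2)).length == 1) = true :=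
        beq_iff_eq.mpr hD1
      rw [if_neg (by rw [b0, b2, hEf]; simp)]
      rw [hMx, hDy]
      simp only [List.headI]
      -- facts for pvSearchEq
      have hxR : x ∈ PySem.List.pyRange 1 (count_of_members + 1) 1 := by
        have : x ∈ List.filter (fun v => ((members.count v : Nat) : Int) == 0) (PySem.List.pyRange 1 (count_of_members + 1) 1) := by
          rw [hMx]; exact List.mem_singleton_self x
        exact List.mem_of_mem_filter this
      have hyR : y ∈ PySem.List.pyRange 1 (count_of_members + 1) 1 := by
        have : y ∈ List.filter (fun v => ((members.count v : Nat) : Int) == 2) (PySem.List.pyRange 1 (count_of_members + 1) 1) := by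
          rw [hDy]; exact List.mem_singleton_self y
        exact List.mem_of_mem_filter this
      have hxcnt : ((members.count x : Nat) : Int) = 0 := by
        have : x ∈ List.filter (fun v => ((members.count v : Nat) : Int) == 0) (PySem.List.pyRange 1 (count_of_members + 1) 1) := by
          rw [hMx]; exact List.mem_singleton_self x
        exact beq_iff_eq.mp (List.mem_filter.mp this).2
      have hycnt : ((members.count y : Nat) : Int) = 2 := by
        have : y ∈ List.filter (fun v => ((members.count v : Nat) : Int) == 2) (PySem.List.pyRange 1 (count_of_members + 1) 1) := by
          rw [hDy]; exact List.mem_singleton_self y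
        exact beq_iff_eq.mp (List.mem_filter.mp this).2
      have hxb := (PySem.List.mem_pyRange_one).mp hxR
      have hyb := (PySem.List.mem_pyRange_one).mp hyR
      have hxy : x ≠ y := by
        intro h
        rw [h, hycnt] at hxcnt
        exact absurd hxcnt (by norm_num)
      have hn2 : 2 ≤ count_of_members := by
        rcases eq_or_ne x y with h | h
        · exact absurd h hxy
        · omega
      have hlen : (members.length : Int) = count_of_members :=
        pvLen_eq count_of_members members hmem hM1 hD1 hle
      rw [pvSearchEq count_of_members members x y hn2 hlen hmem ⟨by omega, by omega⟩]
    · -- anything else: both sides give "-1 -1"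
      rw [if_pos (by
        by_cases h1 : ((PySem.List.pyRange 1 (count_of_members + 1) 1).filter (fun v => ((members.count v : Nat) : Int) == 0)).length = 1
        · have h2 : ((PySem.List.pyRange 1 (count_of_members + 1) 1).filter (fun v => ((members.count v : Nat) : Int) == 2)).length ≠ 1 :=
            fun h2 => hMD ⟨h1, h2⟩
          have hb : (((PySem.List.pyRange 1 (count_of_members + 1) 1).filter (fun v => ((members.count v : Nat) : Int) == 2)).length == 1) = false :=
            beq_eq_false_iff_ne.mpr h2
          rw [hb]
          simp
        · have hb : (((PySem.List.pyRange 1 (count_of_members + 1) 1).filter (fun v => ((members.count v : Nat) : Int) == 0)).length == 1) = false :=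
            beq_eq_false_iff_ne.mpr h1
          rw [hb]
          simp)]
      rcases hS2 with hS2 | hS3
      · obtain ⟨⟨c, p, m⟩, hcl⟩ := pvAClassify_isSome ((PySem.List.pyRange 1 (count_of_members + 1) 1).map (fun v => (v, ((members.count v : Nat) : Int)))) 0 none none le_rfl (by omega)
        obtain ⟨hc, hp, hm⟩ := pvAClassify_some hcl
        rw [hcl]
        by_cases hs2 : pvS ((PySem.List.pyRange 1 (count_of_members + 1) 1).map (fun v => (v, ((members.count v : Nat) : Int)))) = 2
        · -- total 2 but not one-and-one: two missing (search never fires) or two doubled (excluded by Pre_)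
          have hab : ((PySem.List.pyRange 1 (count_of_members + 1) 1).filter (fun v => ((members.count v : Nat) : Int) == 0)).length
              + ((PySem.List.pyRange 1 (count_of_members + 1) 1).filter (fun v => ((members.count v : Nat) : Int) == 2)).length = 2 := by
            rw [hs2] at hsum
            exact_mod_cast hsum.symm
          have hcases : (((PySem.List.pyRange 1 (count_of_members + 1) 1).filter (fun v => ((members.count v : Nat) : Int) == 0)).length = 2
              ∧ ((PySem.List.pyRange 1 (count_of_members + 1) 1).filter (fun v => ((members.count v : Nat) : Int) == 2)).length = 0)
              ∨ (((PySem.List.pyRange 1 (count_of_members + 1) 1).filter (fun v => ((members.count v : Nat) : Int) == 0)).length = 0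
              ∧ ((PySem.List.pyRange 1 (count_of_members + 1) 1).filter (fun v => ((members.count v : Nat) : Int) == 2)).length = 2) := by
            rcases Nat.lt_trichotomy ((PySem.List.pyRange 1 (count_of_members + 1) 1).filter (fun v => ((members.count v : Nat) : Int) == 0)).length 1 with h | h | h
            · right; omega
            · exact absurd ⟨h, by omega⟩ hMD
            · left; omega
          rcases hcases with ⟨hM2, hD0⟩ | ⟨hM0, hD2⟩
          · have hDnil : ((PySem.List.pyRange 1 (count_of_members + 1) 1).filter (fun v => ((members.count v : Nat) : Int) == 2)) = [] :=
              List.length_eq_zero_iff.mp hD0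
            rw [pvLastP_filter_nil (fun v => v == 2) (fun v => ((members.count v : Nat) : Int)) _ none hDnil] at hp
            have hcv : c = 2 := by rw [hc]; omega
            subst hp hcv
            have e0 : ((2 : Int) == 0) = false := by decide
            have e2 : ((2 : Int) == 2) = true := by decide
            simp only [e0, e2, Bool.false_eq_true, if_false, if_true]
            exact pvASearch_none m members (PySem.List.enumerate members 0)
          · -- contradiction with Pre_ (the excluded corner)
            exfalso
            apply hcorner
            have e0 : ((PySem.List.pyRange 1 (count_of_members + 1) 1).filter (fun v => members.count v == 0))
                = ((PySem.List.pyRange 1 (count_of_members + 1) 1).filter (fun v => ((members.count v : Nat) : Int) == 0)) :=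
              List.filter_congr (fun v _ => (pvCast_beq0 (members.count v)).symm)
            have e2 : ((PySem.List.pyRange 1 (count_of_members + 1) 1).filter (fun v => members.count v == 2))
                = ((PySem.List.pyRange 1 (count_of_members + 1) 1).filter (fun v => ((members.count v : Nat) : Int) == 2)) :=
              List.filter_congr (fun v _ => (pvCast_beq2 (members.count v)).symm)
            refine ⟨by rw [e0]; exact hM0, by rw [e2]; exact hD2, ?_⟩
            intro v hv
            have := hle v hv
            omega
        · -- total 0 or 1: "-1 -1" on the A side too
          have hge := pvS_nonneg ((PySem.List.pyRange 1 (count_of_members + 1) 1).map (fun v => (v, ((members.count v : Nat) : Int))))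
          have hc0 : (c == 0) = true ∨ ((c == 0) = false ∧ (c == 2) = false) := by
            by_cases h01 : c = 0
            · left; simp [h01]
            · right
              exact ⟨beq_eq_false_iff_ne.mpr h01, beq_eq_false_iff_ne.mpr (by omega)⟩
          rcases hc0 with h1 | ⟨h1, h2⟩
          · simp [h1]
          · simp [h1, h2]
      · -- total ≥ 3: "-1 -1" on the A side
        cases hcl : pvAClassify ((PySem.List.pyRange 1 (count_of_members + 1) 1).map (fun v => (v, ((members.count v : Nat) : Int)))) 0 none none with
        | none => rfl
        | some t =>
          obtain ⟨c, p, m⟩ := t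
          obtain ⟨hc, -, -⟩ := pvAClassify_some hcl
          have hc0 : (c == 0) = false := beq_eq_false_iff_ne.mpr (by omega)
          have hc2 : (c == 2) = false := beq_eq_false_iff_ne.mpr (by omega)
          simp [hc0, hc2]

-- ===== VERDICT (by name: the statement is the Claim_ definition above) =====
theorem full_answer_spec : Claim_equal_full_answer := by
  intro n ms _ hpre
  unfold Spec_full_answer
  exact full_answer_spec' n ms hpre
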